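-- pv_equiv track=rewrite | github.com/Giammash/Robustic | mindmove/gui/protocols/training.py | _parse_per_class_channels
-- ===== SOURCE A (Python) =====
-- def _parse_per_class_channels(text: str) -> list:
--     """Parse channel list from text field (1-indexed input to 0-indexed)."""
--     if not text.strip():
--         return []
--     channels = []
--     for part in text.split(","):
--         part = part.strip()
--         if part.isdigit():
--             ch = int(part)
--             if 1 <= ch <= 32:
--                 channels.append(ch - 1)
--     return sorted(set(channels))
-- ===== SOURCE B (Python) =====
-- def _parse_per_class_channels(text: str) -> list:
--     """Parse channel list from text field (1-indexed input to 0-indexed)."""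
--     if not text.strip():
--         return []
--     seen = {int(p) for p in map(str.strip, text.split(",")) if p.isdigit()}
--     return [ch - 1 for ch in range(1, 33) if ch in seen]
-- ===== Notes on version B (the rewrite author's own statement) =====
-- stated objective: alternative
-- what changed: B collects every parsed integer (no range check in the loop) into a set via a comprehension, then produces the result by scanning the bounded channel domain 1..32 with a membership test and shifting to 0-index, instead of A's append-with-range-check loop followed by sorted(set(...)).
import Mathlib
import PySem

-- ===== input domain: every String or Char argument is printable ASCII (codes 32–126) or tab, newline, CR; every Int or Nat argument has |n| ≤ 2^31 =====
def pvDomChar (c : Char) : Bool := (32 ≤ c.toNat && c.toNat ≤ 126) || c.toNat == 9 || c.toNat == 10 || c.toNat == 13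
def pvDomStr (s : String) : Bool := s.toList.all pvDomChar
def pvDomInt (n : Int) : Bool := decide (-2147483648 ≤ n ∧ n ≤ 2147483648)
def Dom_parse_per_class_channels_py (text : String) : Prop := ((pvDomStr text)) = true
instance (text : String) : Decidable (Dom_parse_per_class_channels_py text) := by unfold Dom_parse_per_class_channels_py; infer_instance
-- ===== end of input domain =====

-- B collects every parsed integer into a set (no range check in the loop) and emits the
-- result by scanning channels 1..32 with a membership test; return values proved equal.

-- ===== PORT A =====
-- loop body of A's for-loop (one part of text.split(",")); part = part.strip() inlined at each use
def pvStepA (channels : List Int) (part : String) : List Int :=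
  if PySem.Str.strIsdigit (PySem.Str.strip part) then
    match PySem.Int.ofStr? (PySem.Str.strip part) with   -- int(part): never ValueError when isdigit holds
    | some ch => if 1 ≤ ch ∧ ch ≤ 32 then channels ++ [ch - 1] else channels
    | none => channels
  else channels

def parse_per_class_channels_py (text : String) : List Int :=
  if PySem.Str.strip text = "" then []
  else
    let channels := ((PySem.Str.split? text ",").getD []).foldl pvStepA []   -- "," ≠ "", split? is always some
    PySem.List.sorted (PySem.Set.ofList channels) (fun x => x) false

-- ===== PORT B =====
-- body of B's set comprehension: p is an already-stripped part (B maps str.strip over the parts first)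
def pvCollectB (seen : PySem.Set Int) (p : String) : PySem.Set Int :=
  if PySem.Str.strIsdigit p then
    match PySem.Int.ofStr? p with   -- int(p): never ValueError when isdigit holds
    | some v => PySem.Set.add seen v
    | none => seen
  else seen

def parse_per_class_channels_py_alt (text : String) : List Int :=
  if PySem.Str.strip text = "" then []
  else
    let seen := (((PySem.Str.split? text ",").getD []).map PySem.Str.strip).foldl
      pvCollectB PySem.Set.empty
    -- [ch - 1 for ch in range(1, 33) if ch in seen]
    ((PySem.List.pyRange 1 33).filter (fun ch => decide (ch ∈ seen))).map (fun ch => ch - 1)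

-- ===== PRECONDITION & SPEC =====
def Spec_parse_per_class_channels_py (text : String) (out : List Int) : Prop := out = parse_per_class_channels_py_alt text
instance (text : String) (out : List Int) : Decidable (Spec_parse_per_class_channels_py text out) := by unfold Spec_parse_per_class_channels_py; infer_instance

-- ===== CLAIM (what is proved, stated in full; the proofs are below) =====
def Claim_equal_parse_per_class_channels_py : Prop := ∀ (text : String), Dom_parse_per_class_channels_py text → Spec_parse_per_class_channels_py text (parse_per_class_channels_py text)

-- ===== LEMMAS AND PROOFS =====

-- invariant tying A's channel list to B's set of all parsed integers
def pvInv (c : List Int) (s : PySem.Set Int) : Prop :=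
  ∀ x : Int, x ∈ c ↔ (x + 1) ∈ s ∧ 1 ≤ x + 1 ∧ x + 1 ≤ 32

theorem pvInv_step (c : List Int) (s : PySem.Set Int) (part : String) (h : pvInv c s) :
    pvInv (pvStepA c part) (pvCollectB s (PySem.Str.strip part)) := by
  unfold pvStepA pvCollectB
  by_cases hd : PySem.Str.strIsdigit (PySem.Str.strip part)
  · simp only [hd, if_true]
    cases hv : PySem.Int.ofStr? (PySem.Str.strip part) with
    | none => exact h
    | some ch =>
      dsimp only
      intro x
      rw [PySem.Set.mem_add]
      by_cases hr : 1 ≤ ch ∧ ch ≤ 32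
      · rw [if_pos hr]
        simp only [List.mem_append, List.mem_singleton]
        have hx := h x
        constructor
        · rintro (hc | he)
          · obtain ⟨h1, h2, h3⟩ := hx.mp hc
            exact ⟨Or.inl h1, h2, h3⟩
          · exact ⟨Or.inr (by omega), by omega, by omega⟩
        · rintro ⟨hin | he, h1, h2⟩
          · exact Or.inl (hx.mpr ⟨hin, h1, h2⟩)
          · exact Or.inr (by omega)
      · rw [if_neg hr]
        have hx := h x
        constructor
        · intro hc
          obtain ⟨h1, h2, h3⟩ := hx.mp hc
          exact ⟨Or.inl h1, h2, h3⟩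
        · rintro ⟨hin | he, h1, h2⟩
          · exact hx.mpr ⟨hin, h1, h2⟩
          · exact absurd ⟨by omega, by omega⟩ hr
  · simp only [hd]; exact h

theorem pvInv_foldl (parts : List String) (c : List Int) (s : PySem.Set Int) (h : pvInv c s) :
    pvInv (parts.foldl pvStepA c) ((parts.map PySem.Str.strip).foldl pvCollectB s) := by
  induction parts generalizing c s with
  | nil => exact h
  | cons q qs ih => exact ih _ _ (pvInv_step c s q h)

theorem pv_final (c : List Int) (s : PySem.Set Int) (h : pvInv c s) :
    PySem.List.sorted (PySem.Set.ofList c) (fun x => x) false =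
      ((PySem.List.pyRange 1 33).filter (fun ch => decide (ch ∈ s))).map (fun ch => ch - 1) := by
  apply PySem.List.sorted_eq_of_perm_of_pairwise_lt
  · rw [List.perm_ext_iff_of_nodup
      (((PySem.List.nodup_pyRange_one 1 33).filter _).map (fun a b hab => by omega))
      (PySem.Set.nodup_ofList c)]
    intro a
    rw [PySem.Set.mem_ofList, h a]
    simp only [List.mem_map, List.mem_filter, PySem.List.mem_pyRange_one, decide_eq_true_eq]
    constructor
    · rintro ⟨ch, ⟨⟨h1, h2⟩, hin⟩, he⟩
      refine ⟨by rwa [show a + 1 = ch by omega], by omega, by omega⟩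
    · rintro ⟨hin, h1, h2⟩
      exact ⟨a + 1, ⟨⟨by omega, by omega⟩, hin⟩, by omega⟩
  · exact ((PySem.List.pairwise_lt_pyRange_one 1 33).filter _).map _ (fun a b hab => by omega)

-- ===== VERDICT (by name: the statement is the Claim_ definition above) =====
theorem parse_per_class_channels_py_spec : Claim_equal_parse_per_class_channels_py := by
  intro text _
  unfold Spec_parse_per_class_channels_py parse_per_class_channels_py parse_per_class_channels_py_alt
  by_cases hs : PySem.Str.strip text = ""
  · simp [hs]
  · simp only [hs, if_false]
    exact pv_final _ _ (pvInv_foldl _ _ _ (fun x => by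
      simp [PySem.Set.empty]))
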